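-- pv_equiv track=rewrite | github.com/Sarbajit-2004/Crediverse_Resume_Analyser-Enhancer | Crediverse_V2/app/ai/skills.py | score_tracks
-- ===== SOURCE A (Python) =====
-- def score_tracks(detected_skills: list[str], skills_map: dict) -> list[tuple[str, int, list[str]]]:
--     """
--     Return list of (track, score, matched_skills) sorted by score desc.
--     Score = number of overlaps between detected_skills and track's canonical list.
--     """
--     low = {s.lower() for s in detected_skills}
--     scored: list[tuple[str,int,list[str]]] = []
--     for track, canon in skills_map.items():
--         canon_low = [c.lower() for c in canon]
--         matched = sorted(low.intersection(canon_low))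
--         scored.append((track, len(matched), matched))
--     scored.sort(key=lambda x: x[1], reverse=True)
--     return scored
-- ===== SOURCE B (Python) =====
-- def score_tracks(detected_skills: list[str], skills_map: dict) -> list[tuple[str, int, list[str]]]:
--     # Inverted index: lowercased canonical skill -> set of tracks containing it.
--     index = {}
--     for track, canon in skills_map.items():
--         for c in canon:
--             index.setdefault(c.lower(), set()).add(track)
--     matched_by_track = {track: set() for track in skills_map}
--     for d in {s.lower() for s in detected_skills}:
--         for track in index.get(d, ()):
--             matched_by_track[track].add(d)
--     scored = [(track, len(m), sorted(m)) for track, m in matched_by_track.items()]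
--     scored.sort(key=lambda x: x[1], reverse=True)
--     return scored
-- ===== Notes on version B (the rewrite author's own statement) =====
-- stated objective: alternative
-- what changed: Replaces A's per-track set intersection against the detected-skill set with an inverted index from lowercased canonical skill to its tracks, built in one pass, then distributes each detected skill to the matched-sets of its tracks before scoring and the same stable sort.
import Mathlib
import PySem

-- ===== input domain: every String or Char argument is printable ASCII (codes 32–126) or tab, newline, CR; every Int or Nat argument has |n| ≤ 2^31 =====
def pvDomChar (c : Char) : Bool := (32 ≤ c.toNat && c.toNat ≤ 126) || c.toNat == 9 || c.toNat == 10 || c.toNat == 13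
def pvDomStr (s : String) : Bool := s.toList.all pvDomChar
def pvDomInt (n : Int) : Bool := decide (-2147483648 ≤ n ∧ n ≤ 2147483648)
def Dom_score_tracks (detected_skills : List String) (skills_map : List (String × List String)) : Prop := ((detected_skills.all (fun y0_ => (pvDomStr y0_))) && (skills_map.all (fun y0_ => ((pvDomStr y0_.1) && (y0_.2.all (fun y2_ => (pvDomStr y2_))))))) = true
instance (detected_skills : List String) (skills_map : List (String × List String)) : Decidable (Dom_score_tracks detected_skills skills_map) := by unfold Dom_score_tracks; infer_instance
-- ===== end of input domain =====

-- B replaces A's per-track intersection with an inverted index (lowercased skill -> tracks),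
-- distributing each detected skill to its tracks in one pass (objective: alternative decomposition).

-- ===== PORT A =====
def score_tracks (detected_skills : List String) (skills_map : List (String × List String)) : List (String × Int × List String) :=
  let low : PySem.Set String := PySem.Set.ofList (detected_skills.map PySem.Str.lower)
  let scored := skills_map.foldl (fun acc tc =>
    let canon_low := tc.2.map PySem.Str.lower
    let matched := PySem.List.sorted (PySem.Set.inter low canon_low) (fun x => x) false
    acc ++ [(tc.1, (matched.length : Int), matched)]) []
  PySem.List.sorted scored (fun x => x.2.1) true

-- ===== PORT B =====
def score_tracks_alt (detected_skills : List String) (skills_map : List (String × List String)) : List (String × Int × List String) :=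
  -- index.setdefault(c.lower(), set()).add(track)  ==  modify with default empty set
  let index : PySem.Dict String (PySem.Set String) :=
    skills_map.foldl (fun idx tc =>
      tc.2.foldl (fun idx c =>
        idx.modify (PySem.Str.lower c) PySem.Set.empty (fun s => s.add tc.1)) idx)
      PySem.Dict.empty
  let matched0 : PySem.Dict String (PySem.Set String) :=
    skills_map.foldl (fun d tc => d.insert tc.1 PySem.Set.empty) PySem.Dict.empty
  let low : PySem.Set String := PySem.Set.ofList (detected_skills.map PySem.Str.lower)
  let matched := low.foldl (fun d dd =>
      (index.getD dd PySem.Set.empty).foldl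
        (fun d t => d.modify t PySem.Set.empty (fun s => s.add dd)) d)
    matched0
  let scored := matched.items.map (fun ti =>
    let m := PySem.List.sorted ti.2 (fun x => x) false
    (ti.1, (m.length : Int), m))
  PySem.List.sorted scored (fun x => x.2.1) true

-- ===== PRECONDITION & SPEC =====
-- Pre_ excludes association lists with duplicate track keys, which do not represent any Python
-- dict (A's parameter skills_map is a dict, so Python never reaches such an input).
def Pre_score_tracks (detected_skills : List String) (skills_map : List (String × List String)) : Prop :=
  (skills_map.map Prod.fst).Nodup
instance (detected_skills : List String) (skills_map : List (String × List String)) : Decidable (Pre_score_tracks detected_skills skills_map) := by unfold Pre_score_tracks; infer_instance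
def pvWitness_score_tracks : List String × (List (String × List String)) :=
  (["Python", "sql"], [("Data", ["python", "SQL", "Pandas"]), ("Web", ["JS", "HTML"])])
def Spec_score_tracks (detected_skills : List String) (skills_map : List (String × List String)) (out : List (String × Int × List String)) : Prop := out = score_tracks_alt detected_skills skills_map
instance (detected_skills : List String) (skills_map : List (String × List String)) (out : List (String × Int × List String)) : Decidable (Spec_score_tracks detected_skills skills_map out) := by unfold Spec_score_tracks; infer_instance

-- ===== CLAIM (what is proved, stated in full; the proofs are below) =====
def Claim_equal_score_tracks : Prop := ∀ (detected_skills : List String) (skills_map : List (String × List String)), Dom_score_tracks detected_skills skills_map → Pre_score_tracks detected_skills skills_map → Spec_score_tracks detected_skills skills_map (score_tracks detected_skills skills_map)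

-- ===== LEMMAS AND PROOFS =====


-- inner index loop over one track's canonical list: what lands at key dd
theorem pv_idx_inner (canon : List String) (tr : String) (idx : PySem.Dict String (PySem.Set String))
    (t dd : String) :
    t ∈ (canon.foldl (fun idx c =>
          idx.modify (PySem.Str.lower c) PySem.Set.empty (fun s => s.add tr)) idx).getD dd PySem.Set.empty ↔
      t ∈ idx.getD dd PySem.Set.empty ∨ (t = tr ∧ dd ∈ canon.map PySem.Str.lower) := by
  induction canon generalizing idx with
  | nil => simp
  | cons c rest ih =>
    simp only [List.foldl_cons, ih, List.map_cons, List.mem_cons]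
    by_cases h : dd = PySem.Str.lower c
    · subst h
      rw [PySem.Dict.getD_modify_self]
      simp [PySem.Set.mem_add]
      tauto
    · rw [PySem.Dict.getD_modify_of_ne _ _ _ h]
      tauto

-- the full inverted index: t ∈ index[dd] iff some (t, canon) entry has dd among its lowered skills
theorem pv_idx (sm : List (String × List String)) (idx : PySem.Dict String (PySem.Set String))
    (t dd : String) :
    t ∈ (sm.foldl (fun idx tc =>
          tc.2.foldl (fun idx c =>
            idx.modify (PySem.Str.lower c) PySem.Set.empty (fun s => s.add tc.1)) idx) idx).getD dd PySem.Set.empty ↔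
      t ∈ idx.getD dd PySem.Set.empty ∨ ∃ tc ∈ sm, tc.1 = t ∧ dd ∈ tc.2.map PySem.Str.lower := by
  induction sm generalizing idx with
  | nil => simp
  | cons tc rest ih =>
    simp only [List.foldl_cons, ih, pv_idx_inner, List.mem_cons]
    constructor
    · rintro ((h | ⟨h1, h2⟩) | ⟨tc', htc', h1, h2⟩)
      · exact Or.inl h
      · exact Or.inr ⟨tc, Or.inl rfl, h1.symm ▸ rfl, h2⟩
      · exact Or.inr ⟨tc', Or.inr htc', h1, h2⟩
    · rintro (h | ⟨tc', (rfl | htc'), h1, h2⟩)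
      · exact Or.inl (Or.inl h)
      · exact Or.inl (Or.inr ⟨h1.symm, h2⟩)
      · exact Or.inr ⟨tc', htc', h1, h2⟩

-- the {track: set() for track in skills_map} dict: every lookup with default ∅ is ∅
theorem pv_matched0_getD (sm : List (String × List String)) (d : PySem.Dict String (PySem.Set String))
    (t : String) (h : d.getD t PySem.Set.empty = PySem.Set.empty) :
    (sm.foldl (fun d tc => d.insert tc.1 PySem.Set.empty) d).getD t PySem.Set.empty = PySem.Set.empty := by
  induction sm generalizing d with
  | nil => exact h
  | cons tc rest ih =>
    refine ih _ ?_
    rw [PySem.Dict.getD_insert]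
    split
    · rfl
    · exact h

-- collapse the nested distribute loop to a single fold over (track, skill) pairs
theorem pv_double_fold (low : List String) (g : String → PySem.Set String)
    (d0 : PySem.Dict String (PySem.Set String)) :
    low.foldl (fun d dd => (g dd).foldl (fun d t => d.modify t PySem.Set.empty (fun s => s.add dd)) d) d0
      = (low.flatMap (fun dd => (g dd).map (fun t => (t, dd)))).foldl
          (fun d p => d.modify p.1 PySem.Set.empty (fun s => s.add p.2)) d0 := by
  induction low generalizing d0 with
  | nil => rfl
  | cons dd rest ih =>
    simp only [List.foldl_cons, List.flatMap_cons, List.foldl_append, ih, List.foldl_map]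

-- one pair-fold: the set at key t collects exactly the pairs whose first component is t
theorem pv_pairs_getD (P : List (String × String)) (d : PySem.Dict String (PySem.Set String)) (t : String) :
    (P.foldl (fun d p => d.modify p.1 PySem.Set.empty (fun s => s.add p.2)) d).getD t PySem.Set.empty
      = PySem.Set.update (d.getD t PySem.Set.empty) ((P.filter (fun p => p.1 == t)).map Prod.snd) := by
  induction P generalizing d with
  | nil => simp [PySem.Set.update]
  | cons p rest ih =>
    simp only [List.foldl_cons, ih, List.filter_cons]
    by_cases h : p.1 = t
    · subst h
      rw [PySem.Dict.getD_modify_self]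
      simp [PySem.Set.update]
    · rw [PySem.Dict.getD_modify_of_ne _ _ _ (Ne.symm h)]
      simp [h]

-- updating with elements already present changes nothing
theorem pv_update_eq_self (s : PySem.Set String) (xs : List String) (h : ∀ x ∈ xs, x ∈ s) :
    PySem.Set.update s xs = s := by
  induction xs generalizing s with
  | nil => rfl
  | cons x rest ih =>
    have : PySem.Set.update s (x :: rest) = PySem.Set.update (s.add x) rest := by
      simp [PySem.Set.update]
    rw [this, PySem.Set.add_of_mem (h x (List.mem_cons_self ..))]
    exact ih s (fun y hy => h y (List.mem_cons_of_mem _ hy))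


-- the heart: under distinct track keys the two ports agree
theorem pv_main (ds : List String) (sm : List (String × List String))
    (hpre : (sm.map Prod.fst).Nodup) : score_tracks ds sm = score_tracks_alt ds sm := by
  unfold score_tracks score_tracks_alt
  simp only []
  set low : PySem.Set String := PySem.Set.ofList (ds.map PySem.Str.lower) with hlow
  set index : PySem.Dict String (PySem.Set String) :=
    sm.foldl (fun idx tc =>
      tc.2.foldl (fun idx c =>
        idx.modify (PySem.Str.lower c) PySem.Set.empty (fun s => s.add tc.1)) idx)
      PySem.Dict.empty with hidx
  set matched0 : PySem.Dict String (PySem.Set String) :=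
    sm.foldl (fun d tc => d.insert tc.1 PySem.Set.empty) PySem.Dict.empty with hM0def
  set matched : PySem.Dict String (PySem.Set String) :=
    low.foldl (fun d dd =>
      (index.getD dd PySem.Set.empty).foldl
        (fun d t => d.modify t PySem.Set.empty (fun s => s.add dd)) d) matched0 with hmdef
  -- index membership
  have hidx_mem : ∀ t dd, t ∈ index.getD dd PySem.Set.empty ↔
      ∃ tc ∈ sm, tc.1 = t ∧ dd ∈ tc.2.map PySem.Str.lower := by
    intro t dd
    rw [hidx, pv_idx]
    simp [PySem.Dict.getD_empty, PySem.Set.empty]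
  -- the initial per-track dict is all-empty
  have hM0 : ∀ t, matched0.getD t PySem.Set.empty = PySem.Set.empty := by
    intro t
    exact pv_matched0_getD sm _ t (PySem.Dict.getD_empty _ _)
  -- the pair list driving the distribute loop
  set P : List (String × String) :=
    low.flatMap (fun dd => (index.getD dd PySem.Set.empty).map (fun t => (t, dd))) with hP
  have hmatched : matched = P.foldl
      (fun d p => d.modify p.1 PySem.Set.empty (fun s => s.add p.2)) matched0 := by
    rw [hmdef, hP]
    exact pv_double_fold low _ matched0
  have hgetD : ∀ t, matched.getD t PySem.Set.empty
      = PySem.Set.update PySem.Set.empty ((P.filter (fun p => p.1 == t)).map Prod.snd) := by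
    intro t
    rw [hmatched, pv_pairs_getD, hM0]
  have hmemP : ∀ (p : String × String), p ∈ P ↔ p.2 ∈ low ∧ p.1 ∈ index.getD p.2 PySem.Set.empty := by
    intro p
    rw [hP]
    simp only [List.mem_flatMap, List.mem_map]
    constructor
    · rintro ⟨dd, hdd, tr, htr, rfl⟩
      exact ⟨hdd, htr⟩
    · rintro ⟨h1, h2⟩
      exact ⟨p.2, h1, p.1, h2, rfl⟩
  have hmem : ∀ t x, x ∈ matched.getD t PySem.Set.empty ↔
      x ∈ low ∧ t ∈ index.getD x PySem.Set.empty := by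
    intro t x
    rw [hgetD, PySem.Set.mem_update]
    simp only [List.mem_map, List.mem_filter, beq_iff_eq]
    constructor
    · rintro (h | ⟨p, ⟨hp, hp1⟩, hp2⟩)
      · simp [PySem.Set.empty] at h
      · rw [hmemP] at hp
        subst hp1; subst hp2
        exact ⟨hp.1, hp.2⟩
    · rintro ⟨h1, h2⟩
      exact Or.inr ⟨(t, x), ⟨(hmemP (t, x)).2 ⟨h1, h2⟩, rfl⟩, rfl⟩
  have hnodup_val : ∀ t, (matched.getD t PySem.Set.empty).Nodup := by
    intro t
    rw [hgetD]
    exact PySem.Set.nodup_update _ _ List.nodup_nil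
  -- keys of matched0 and matched are exactly the tracks, in skills_map order
  have hM0items : matched0.items = sm.map (fun tc => (tc.1, (PySem.Set.empty : PySem.Set String))) := by
    rw [hM0def]
    have := PySem.Dict.items_foldl_insert_fresh sm (fun tc => tc.1)
      (fun _ => (PySem.Set.empty : PySem.Set String)) PySem.Dict.empty
      (fun a _ => PySem.Dict.contains_empty _) hpre
    simpa using this
  have hM0keys : matched0.keys = sm.map Prod.fst := by
    simp [PySem.Dict.keys, hM0items, List.map_map, Function.comp]
  have hkeys : matched.keys = sm.map Prod.fst := by
    rw [hmatched]
    rw [PySem.Dict.keys_foldl_modify_key P Prod.fst PySem.Set.empty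
      (fun _ p => fun s => s.add p.2) matched0]
    rw [hM0keys]
    apply pv_update_eq_self
    intro x hx
    simp only [List.mem_map] at hx
    obtain ⟨p, hp, rfl⟩ := hx
    rw [hmemP] at hp
    obtain ⟨tc, htc, h1, _⟩ := (hidx_mem p.1 p.2).1 hp.2
    exact List.mem_map.2 ⟨tc, htc, h1⟩
  have hitems : matched.items = (sm.map Prod.fst).map (fun k => (k, matched.getD k PySem.Set.empty)) := by
    rw [← hkeys]
    exact PySem.Dict.items_eq_map_keys matched (hkeys ▸ hpre) _
  -- both scored lists are maps over skills_map; identify them entrywise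
  rw [PySem.List.foldl_append_singleton_eq_map, List.nil_append, hitems, List.map_map, List.map_map]
  congr 1
  apply List.map_congr_left
  intro tc htc
  simp only [Function.comp]
  have hperm : (PySem.Set.inter low (tc.2.map PySem.Str.lower)).Perm (matched.getD tc.1 PySem.Set.empty) := by
    rw [List.perm_ext_iff_of_nodup (PySem.Set.nodup_inter _ _ (PySem.Set.nodup_ofList _)) (hnodup_val _)]
    intro a
    rw [PySem.Set.mem_inter, hmem, hidx_mem]
    constructor
    · rintro ⟨h1, h2⟩
      exact ⟨h1, tc, htc, rfl, h2⟩
    · rintro ⟨h1, tc', htc', heq, h2⟩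
      have : tc' = tc := List.inj_on_of_nodup_map hpre htc' htc heq
      exact ⟨h1, this ▸ h2⟩
  have hsorted : PySem.List.sorted (PySem.Set.inter low (tc.2.map PySem.Str.lower)) (fun x => x) false
      = PySem.List.sorted (matched.getD tc.1 PySem.Set.empty) (fun x => x) false :=
    PySem.List.sorted_eq_sorted_of_perm _ _ _ (fun _ _ h => h) hperm
  rw [hsorted]

-- ===== VERDICT (by name: the statement is the Claim_ definition above) =====
theorem score_tracks_spec : Claim_equal_score_tracks := by
  intro ds sm _hdom hpre
  exact pv_main ds sm hpre
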